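-- pv_equiv track=rewrite | github.com/spen428/music-collection-checker | test/StringToFilesystem.py | _explode_filepaths
-- ===== SOURCE A (Python) =====
-- from typing import List, Dict, Tuple, Set, Iterable
--
-- def _explode_filepaths(string: str, root_dir: str) -> List[Tuple[str, str, str]]:
--     lines = string.strip().splitlines()
--     intermediate_dirs = _get_intermediate_dirs(lines, root_dir)
--
--     file_paths = sorted(list({*lines, *intermediate_dirs}))
--     exploded = []
--     for file_path in file_paths:
--         rs = file_path.rsplit('/', 2)
--         if len(rs) == 3:
--             as_tuple = (rs[0], rs[1], rs[2])
--             exploded.append(as_tuple)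
--     return exploded
--
-- def _get_intermediate_dirs(lines: Iterable[str], root_dir: str) -> Set[str]:
--     intermediate_dirs = set()
--     for line in lines:
--         index = 0
--         while True:
--             index = line.find('/', index) + 1
--             if index == 0:
--                 break
--             substr = line[0:index]
--             if substr == root_dir:
--                 continue
--             if substr.startswith(root_dir):
--                 intermediate_dirs.add(substr)
--     return intermediate_dirs
-- ===== SOURCE B (Python) =====
-- from typing import List, Tuple
--
-- def _explode_filepaths(string: str, root_dir: str) -> List[Tuple[str, str, str]]:
--     lines = string.strip().splitlines()
--     # Directories are found by peeling each line from the RIGHT: start at the longest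
--     # '/'-terminated prefix and repeatedly cut at the previous slash, stopping early as
--     # soon as the prefix is empty, already known, equal to root_dir, or no longer an
--     # extension of root_dir (all shorter prefixes are then disqualified too).
--     dirs = set()
--     for line in lines:
--         p = line[:line.rfind('/') + 1]
--         while p and p not in dirs and p != root_dir and p.startswith(root_dir):
--             dirs.add(p)
--             p = p[:p.rfind('/', 0, len(p) - 1) + 1]
--     exploded = []
--     for path in sorted(set(lines) | dirs):
--         i = path.rfind('/')
--         if i != -1:
--             j = path.rfind('/', 0, i)
--             if j != -1:
--                 exploded.append((path[:j], path[j + 1:i], path[i + 1:]))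
--     return exploded
-- ===== Notes on version B (the rewrite author's own statement) =====
-- stated objective: alternative
-- what changed: Intermediate directories are found by peeling each line from the right (longest '/'-terminated prefix first, cutting at the previous slash) with early termination as soon as the prefix is empty, already in the set, equal to root_dir, or not an extension of root_dir, instead of A's left-to-right scan over every slash position; the final tuples are cut out with two rfind positions instead of rsplit.
import Mathlib
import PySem

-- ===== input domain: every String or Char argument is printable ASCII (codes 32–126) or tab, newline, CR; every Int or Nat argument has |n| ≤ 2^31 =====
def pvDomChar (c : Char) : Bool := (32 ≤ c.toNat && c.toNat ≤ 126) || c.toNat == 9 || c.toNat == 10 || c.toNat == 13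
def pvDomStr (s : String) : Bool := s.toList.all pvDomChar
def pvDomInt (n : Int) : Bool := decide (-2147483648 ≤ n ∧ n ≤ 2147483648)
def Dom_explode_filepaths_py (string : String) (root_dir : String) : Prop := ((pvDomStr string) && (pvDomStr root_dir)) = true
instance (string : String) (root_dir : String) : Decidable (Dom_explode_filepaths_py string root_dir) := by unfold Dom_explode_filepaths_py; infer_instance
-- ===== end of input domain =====

-- B finds the intermediate directories by peeling each line from the right (longest
-- '/'-terminated prefix first, cutting at the previous slash, stopping early when the
-- prefix is empty, already known, equal to root_dir or not an extension of root_dir)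
-- instead of A's left-to-right scan over every slash position, and cuts the final
-- tuples at two rfind positions instead of rsplit (objective: alternative; no speed claim).

-- ===== PORT A =====
-- bounds of line.find('/', k) for a single-char needle: cited by pvLoopA's termination proof
theorem pvFindFrom_slash_bounds (s : List Char) (k : Nat)
    (h : PySem.Chars.findFrom s ['/'] (k : Int) none ≠ -1) :
    (k : Int) ≤ PySem.Chars.findFrom s ['/'] (k : Int) none ∧
    PySem.Chars.findFrom s ['/'] (k : Int) none < s.length := by
  by_cases hk : k ≤ s.length
  · rw [PySem.Chars.findFrom_natCast s ['/'] k hk] at h ⊢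
    by_cases hf : PySem.Chars.find (s.drop k) ['/'] = -1
    · simp [hf] at h
    · rw [if_neg hf] at h ⊢
      have h0 : 0 ≤ PySem.Chars.find (s.drop k) ['/'] := by
        have := PySem.Chars.neg_one_le_find (s.drop k) ['/']
        omega
      have hspec := PySem.Chars.find_spec (s := s.drop k) (sub := ['/']) h0
      rcases hspec.1 with ⟨t, ht⟩
      have hlen := congrArg List.length ht
      simp [List.length_drop] at hlen
      have := Int.toNat_of_nonneg h0
      constructor <;> omega
  · exfalso
    apply h
    have hlt : (s.length : Int) < (k : Int) := by exact_mod_cast Nat.lt_of_not_le hk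
    simp only [PySem.Chars.findFrom]
    split_ifs <;> first | rfl | omega

-- the 'while True' find loop of _get_intermediate_dirs on one line
-- (line.find('/', index) is PySem.Chars.findFrom — exact)
def pvLoopA (line root : List Char) (index : Nat) (acc : PySem.Set (List Char)) : PySem.Set (List Char) :=
  let i := PySem.Chars.findFrom line ['/'] (index : Int) none + 1
  if h : i = 0 then acc
  else
    let substr := PySem.Chars.slice line (some 0) (some i)
    let acc' := if substr = root then acc
      else if PySem.Chars.startswith substr root then PySem.Set.add acc substr else acc
    pvLoopA line root i.toNat acc'
termination_by line.length + 1 - index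
decreasing_by
  have hne : PySem.Chars.findFrom line ['/'] (index : Int) none ≠ -1 := by
    intro hc; apply h; simp [i, hc]
  have hb := pvFindFrom_slash_bounds line index hne
  omega

-- hand port of file_path.rsplit('/', 2) (single-char separator, maxsplit = 2):
-- scan from the right for up to two separators; exact for this call
def pvRsplit2 (cs : List Char) : List (List Char) :=
  let r := cs.reverse
  match r.dropWhile (fun c => c ≠ '/') with
  | [] => [cs]
  | _ :: r1 =>
    let last := (r.takeWhile (fun c => c ≠ '/')).reverse
    match r1.dropWhile (fun c => c ≠ '/') with
    | [] => [r1.reverse, last]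
    | _ :: r2 => [r2.reverse, (r1.takeWhile (fun c => c ≠ '/')).reverse, last]

def explode_filepaths_py (string : String) (root_dir : String) : List (String × String × String) :=
  let lines := PySem.Chars.splitlines (PySem.Chars.strip string.toList)
  let root := root_dir.toList
  let intermediate_dirs := lines.foldl (fun acc line => pvLoopA line root 0 acc) PySem.Set.empty
  let file_paths := PySem.List.sorted (PySem.Set.update (PySem.Set.ofList lines) intermediate_dirs) (fun x => x) false
  file_paths.foldl (fun exploded fp =>
    let rs := pvRsplit2 fp
    if rs.length = 3 then
      -- rs[0], rs[1], rs[2]: in this branch rs has length 3, so the defaults are never used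
      exploded ++ [(String.ofList (PySem.List.pyGetD rs 0 []),
                    String.ofList (PySem.List.pyGetD rs 1 []),
                    String.ofList (PySem.List.pyGetD rs 2 []))]
    else exploded) []

-- ===== PORT B =====
-- hand port of s.rfind('/') for a single-char needle: the index of the LAST '/' in s,
-- -1 if there is none — exact (proved against Python's contract by the lemmas below)
def pvRfindSlash : List Char → Int
  | [] => -1
  | c :: t => if pvRfindSlash t = -1 then (if c = '/' then 0 else -1) else pvRfindSlash t + 1

-- cited by pvPeel's termination proof
theorem pvRfind_neg_le (cs : List Char) : -1 ≤ pvRfindSlash cs := by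
  induction cs with
  | nil => simp [pvRfindSlash]
  | cons c t IH => simp only [pvRfindSlash]; split_ifs <;> omega

-- cited by pvPeel's termination proof
theorem pvRfind_lt (cs : List Char) : pvRfindSlash cs < cs.length := by
  induction cs with
  | nil => simp [pvRfindSlash]
  | cons c t IH => simp only [pvRfindSlash, List.length_cons]; split_ifs <;> push_cast <;> omega

-- the while loop of B: peel p from the right, stopping on the first failing condition
-- (p.rfind('/', 0, len(p)-1) searches p[:len(p)-1] = p.dropLast — exact)
def pvPeel (root p : List Char) (dirs : PySem.Set (List Char)) : PySem.Set (List Char) :=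
  if p ≠ [] ∧ p ∉ dirs ∧ p ≠ root ∧ PySem.Chars.startswith p root = true then
    pvPeel root (p.take (pvRfindSlash p.dropLast + 1).toNat) (PySem.Set.add dirs p)
  else dirs
termination_by p.length
decreasing_by
  have h1 := pvRfind_lt p.dropLast
  have h2 := pvRfind_neg_le p.dropLast
  have h3 : p.length ≠ 0 := by
    simpa using (‹p ≠ [] ∧ p ∉ dirs ∧ p ≠ root ∧ PySem.Chars.startswith p root = true›).1
  simp only [List.length_take, List.length_dropLast] at *
  omega

def explode_filepaths_py_alt (string : String) (root_dir : String) : List (String × String × String) :=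
  let lines := PySem.Chars.splitlines (PySem.Chars.strip string.toList)
  let root := root_dir.toList
  -- line[:line.rfind('/') + 1]: the rfind result is ≥ -1, so the slice bound is ≥ 0 — take is exact
  let dirs := lines.foldl (fun dirs line => pvPeel root (line.take (pvRfindSlash line + 1).toNat) dirs) PySem.Set.empty
  (PySem.List.sorted (PySem.Set.union (PySem.Set.ofList lines) dirs) (fun x => x) false).foldl
    (fun ex p =>
      let i := pvRfindSlash p
      if i ≠ -1 then
        -- path.rfind('/', 0, i) with 0 ≤ i searches path[:i] — exact
        let j := pvRfindSlash (p.take i.toNat)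
        if j ≠ -1 then
          -- path[:j] with j ≥ 0 is take; the other two slices have bounds ≥ 0
          ex ++ [(String.ofList (p.take j.toNat),
                  String.ofList (PySem.List.slice p (some (j + 1)) (some i)),
                  String.ofList (PySem.List.slice p (some (i + 1)) none))]
        else ex
      else ex) []

-- ===== PRECONDITION & SPEC =====
def Spec_explode_filepaths_py (string : String) (root_dir : String) (out : List (String × String × String)) : Prop := out = explode_filepaths_py_alt string root_dir
instance (string : String) (root_dir : String) (out : List (String × String × String)) : Decidable (Spec_explode_filepaths_py string root_dir out) := by unfold Spec_explode_filepaths_py; infer_instance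

-- ===== CLAIM (what is proved, stated in full; the proofs are below) =====
def Claim_equal_explode_filepaths_py : Prop := ∀ (string : String) (root_dir : String), Dom_explode_filepaths_py string root_dir → Spec_explode_filepaths_py string root_dir (explode_filepaths_py string root_dir)

-- ===== LEMMAS AND PROOFS =====

def pvPrefsAux (done : List Char) : List Char → List (List Char)
  | [] => []
  | c :: t => if c = '/' then (done ++ [c]) :: pvPrefsAux (done ++ [c]) t
    else pvPrefsAux (done ++ [c]) t

theorem pvPrefsAux_no_slash (d rest : List Char) (h : '/' ∉ rest) : pvPrefsAux d rest = [] := by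
  induction rest generalizing d with
  | nil => rfl
  | cons c t IH =>
    simp only [List.mem_cons, not_or] at h
    simp [pvPrefsAux, Ne.symm h.1, IH _ h.2]

theorem pvPrefsAux_skip (d u v : List Char) (h : '/' ∉ u) :
    pvPrefsAux d (u ++ '/' :: v) = (d ++ u ++ ['/']) :: pvPrefsAux (d ++ u ++ ['/']) v := by
  induction u generalizing d with
  | nil => simp [pvPrefsAux]
  | cons c t IH =>
    simp only [List.mem_cons, not_or] at h
    simp only [List.cons_append, pvPrefsAux, if_neg (Ne.symm h.1)]
    rw [IH _ h.2]
    simp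

theorem pvTakeWhile_all_slash (p : Char → Bool) (a u : List Char)
    (ha : ∀ c ∈ a, p c = true) (hp : p '/' = false) :
    (a ++ '/' :: u).takeWhile p = a := by
  induction a with
  | nil => simp [List.takeWhile, hp]
  | cons x t IH =>
    simp only [List.cons_append, List.takeWhile_cons, ha x (by simp)]
    rw [IH (fun c hc => ha c (by simp [hc]))]
    simp

theorem pvRev_split (u v : List Char) (h : '/' ∉ v) :
    (u ++ '/' :: v).reverse.dropWhile (fun c => c ≠ '/') = '/' :: u.reverse ∧
    (u ++ '/' :: v).reverse.takeWhile (fun c => c ≠ '/') = v.reverse := by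
  have hrev : (u ++ '/' :: v).reverse = v.reverse ++ '/' :: u.reverse := by simp
  have hall : ∀ c ∈ v.reverse, (fun c => decide (c ≠ '/')) c = true := by
    intro c hc; simp only [List.mem_reverse] at hc
    simp; rintro rfl; exact h hc
  constructor
  · rw [hrev]
    have h1 : v.reverse.dropWhile (fun c => c ≠ '/') = [] := List.dropWhile_eq_nil_iff.mpr (by
      intro c hc; simpa using hall c hc)
    rw [List.dropWhile_append, h1]
    norm_num [List.dropWhile]
  · rw [hrev]
    exact pvTakeWhile_all_slash _ _ _ hall (by simp)

theorem pvDecompose (cs : List Char) (h : '/' ∈ cs) :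
    ∃ u v, cs = u ++ '/' :: v ∧ '/' ∉ v := by
  induction cs with
  | nil => simp at h
  | cons c t IH =>
    by_cases ht : '/' ∈ t
    · obtain ⟨u, v, rfl, hv⟩ := IH ht
      exact ⟨c :: u, v, rfl, hv⟩
    · have hc : c = '/' := by
        rcases List.mem_cons.mp h with h1 | h1
        · exact h1.symm
        · exact absurd h1 ht
      exact ⟨[], t, by rw [hc]; rfl, ht⟩

theorem pvSorted_of_perm (xs ys : List (List Char)) (h : xs.Perm ys) :
    PySem.List.sorted xs (fun x => x) false = PySem.List.sorted ys (fun x => x) false := by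
  have h2 := @PySem.List.sorted_eq_sorted_of_perm (List Char) (List Char) List.instLinearOrder
    xs ys (fun x => x) (fun a b hab => hab) h
  have e : (LinearOrder.toDecidableLT : DecidableLT (List Char)) = (fun a b => List.decidableLT a b) := by
    funext a b; exact Subsingleton.elim _ _
  rw [e] at h2
  exact h2

def pvStepA (root : List Char) (acc : PySem.Set (List Char)) (p : List Char) : PySem.Set (List Char) :=
  if p = root then acc
  else if PySem.Chars.startswith p root then PySem.Set.add acc p else acc

def pvStepB (root : List Char) (s : PySem.Set (List Char)) (p : List Char) : PySem.Set (List Char) :=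
  if p ≠ root ∧ PySem.Chars.startswith p root then PySem.Set.add s p else s

theorem pvStepA_eq_stepB (root : List Char) (s : PySem.Set (List Char)) (p : List Char) :
    pvStepA root s p = pvStepB root s p := by
  unfold pvStepA pvStepB
  by_cases h1 : p = root
  · simp [h1]
  · by_cases h2 : PySem.Chars.startswith p root <;> simp [h1, h2]

theorem pvMem_fold_step (root : List Char) (P : List (List Char)) (s : PySem.Set (List Char))
    (x : List Char) :
    x ∈ P.foldl (pvStepB root) s ↔
      x ∈ s ∨ (x ∈ P ∧ x ≠ root ∧ PySem.Chars.startswith x root = true) := by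
  induction P generalizing s with
  | nil => simp
  | cons p t IH =>
    rw [List.foldl_cons, IH]
    unfold pvStepB
    by_cases hcond : p ≠ root ∧ PySem.Chars.startswith p root = true
    · rw [if_pos hcond, PySem.Set.mem_add]
      constructor
      · rintro ((hx | rfl) | h)
        · exact Or.inl hx
        · exact Or.inr ⟨by simp, hcond⟩
        · exact Or.inr ⟨by simp [h.1], h.2⟩
      · rintro (hx | ⟨hmem, hx⟩)
        · exact Or.inl (Or.inl hx)
        · rcases List.mem_cons.mp hmem with rfl | hmem'
          · exact Or.inl (Or.inr rfl)
          · exact Or.inr ⟨hmem', hx⟩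
    · rw [if_neg hcond]
      constructor
      · rintro (hx | h)
        · exact Or.inl hx
        · exact Or.inr ⟨by simp [h.1], h.2⟩
      · rintro (hx | ⟨hmem, hx⟩)
        · exact Or.inl hx
        · rcases List.mem_cons.mp hmem with rfl | hmem'
          · exact absurd hx hcond
          · exact Or.inr ⟨hmem', hx⟩

theorem pvMem_lines_fold (root : List Char) (lines : List (List Char)) (s : PySem.Set (List Char))
    (x : List Char) :
    x ∈ lines.foldl (fun acc l => (pvPrefsAux [] l).foldl (pvStepB root) acc) s ↔
      x ∈ s ∨ ∃ l ∈ lines, x ∈ pvPrefsAux [] l ∧ x ≠ root ∧ PySem.Chars.startswith x root = true := by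
  induction lines generalizing s with
  | nil => simp
  | cons l t IH =>
    rw [List.foldl_cons, IH, pvMem_fold_step]
    constructor
    · rintro ((hx | h) | ⟨l', hl', h⟩)
      · exact Or.inl hx
      · exact Or.inr ⟨l, by simp, h⟩
      · exact Or.inr ⟨l', by simp [hl'], h⟩
    · rintro (hx | ⟨l', hl', h⟩)
      · exact Or.inl (Or.inl hx)
      · rcases List.mem_cons.mp hl' with rfl | hl''
        · exact Or.inl (Or.inr h)
        · exact Or.inr ⟨l', hl'', h⟩

theorem pvLoopA_eq (m : Nat) : ∀ (line root : List Char) (k : Nat) (acc : PySem.Set (List Char)),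
    line.length - k = m → k ≤ line.length →
    pvLoopA line root k acc
      = (pvPrefsAux (line.take k) (line.drop k)).foldl (pvStepA root) acc := by
  induction m using Nat.strong_induction_on with
  | _ m IH =>
    intro line root k acc hm hk
    rw [pvLoopA]
    by_cases h0 : PySem.Chars.findFrom line ['/'] (k : Int) none + 1 = 0
    · rw [dif_pos h0]
      have hkc := PySem.Chars.findFrom_natCast line ['/'] k hk
      have hfind : PySem.Chars.find (line.drop k) ['/'] = -1 := by
        by_contra hf
        rw [if_neg hf] at hkc
        have := PySem.Chars.neg_one_le_find (line.drop k) ['/']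
        omega
      have hns : '/' ∉ line.drop k := by
        intro hmem
        exact (PySem.Chars.find_eq_neg_one_iff _ _).mp hfind
          ((List.singleton_infix_iff _ _).mpr hmem)
      rw [pvPrefsAux_no_slash _ _ hns]
      rfl
    · rw [dif_neg h0]
      have hne : PySem.Chars.findFrom line ['/'] (k : Int) none ≠ -1 := by
        intro hc; exact h0 (by rw [hc]; ring)
      have hb := pvFindFrom_slash_bounds line k hne
      have hkc := PySem.Chars.findFrom_natCast line ['/'] k hk
      have hfne : PySem.Chars.find (line.drop k) ['/'] ≠ -1 := by
        intro hf; rw [if_pos hf] at hkc; exact hne hkc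
      rw [if_neg hfne] at hkc
      have hf0 : 0 ≤ PySem.Chars.find (line.drop k) ['/'] := by
        have := PySem.Chars.neg_one_le_find (line.drop k) ['/']
        omega
      set f := PySem.Chars.find (line.drop k) ['/'] with hfdef
      have hspec := PySem.Chars.find_spec (s := line.drop k) (sub := ['/']) hf0
      obtain ⟨v, hv⟩ := hspec.1
      have hflen : f.toNat < (line.drop k).length := by
        have h1 := congrArg List.length hv
        rw [List.length_append, List.length_drop] at h1
        simp at h1
        rw [List.length_drop]
        omega
      set u := (line.drop k).take f.toNat with hudef
      have hulen : u.length = f.toNat := by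
        rw [hudef, List.length_take]
        omega
      have hdecomp : line.drop k = u ++ '/' :: v := by
        conv_lhs => rw [← List.take_append_drop f.toNat (line.drop k)]
        rw [← hudef, ← hv]
        rfl
      have hnu : '/' ∉ u := by
        intro hmem
        obtain ⟨i, hi, hgi⟩ := List.mem_iff_getElem.mp hmem
        have hilt : i < f.toNat := by
          have := hi
          rw [hulen] at this
          exact this
        apply hspec.2 i hilt
        have hidx : (line.drop k)[i]'(by rw [List.length_drop]; omega) = '/' := by
          rw [← hgi]
          exact (List.getElem_take (h := hi)).symm
        rw [List.drop_eq_getElem_cons (show i < (line.drop k).length from by rw [List.length_drop]; omega), hidx]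
        exact ⟨_, rfl⟩
      have hFval : PySem.Chars.findFrom line ['/'] (k : Int) none = (k : Int) + f := hkc
      have hinat : (PySem.Chars.findFrom line ['/'] (k : Int) none + 1).toNat = k + (f.toNat + 1) := by
        rw [hFval]; omega
      have hi0 : (0:Int) ≤ PySem.Chars.findFrom line ['/'] (k : Int) none + 1 := by omega
      have htake : line.take (k + (f.toNat + 1)) = (line.take k ++ u) ++ ['/'] := by
        rw [List.take_add, List.append_assoc]
        congr 1
        rw [hdecomp]
        rw [show f.toNat + 1 = u.length + 1 from by omega]
        simp [List.take_append]
      have hsub : PySem.Chars.slice line (some 0) (some (PySem.Chars.findFrom line ['/'] (k : Int) none + 1))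
          = (line.take k ++ u) ++ ['/'] := by
        rw [PySem.Chars.slice_eq_listSlice, PySem.List.slice_zero_start, PySem.List.slice_to _ hi0, hinat]
        exact htake
      have hdrop : line.drop (k + (f.toNat + 1)) = v := by
        rw [← List.drop_drop, hdecomp]
        rw [show f.toNat + 1 = u.length + 1 from by omega]
        simp [List.drop_append]
      have hklen : k + (f.toNat + 1) ≤ line.length := by
        rw [List.length_drop] at hflen
        omega
      dsimp only
      rw [hinat, hsub]
      rw [IH (line.length - (k + (f.toNat + 1))) (by rw [List.length_drop] at hflen; omega)
          line root (k + (f.toNat + 1)) _ rfl hklen]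
      rw [htake, hdrop]
      conv_rhs => rw [hdecomp, pvPrefsAux_skip _ _ _ hnu]
      rw [List.foldl_cons]
      have hassoc : line.take k ++ u ++ ['\x2f'] = (line.take k ++ u) ++ ['\x2f'] := by
        rw [List.append_assoc]
      rw [hassoc]
      rfl

-- ===== new B-side lemmas =====

theorem pvRfind_eq_neg1 (cs : List Char) : pvRfindSlash cs = -1 ↔ '/' ∉ cs := by
  induction cs with
  | nil => simp [pvRfindSlash]
  | cons c t IH =>
    simp only [pvRfindSlash, List.mem_cons, not_or]
    split_ifs with h1 h2
    · subst h2; simp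
    · have := IH.mp h1
      simp [Ne.symm h2, this]
    · have h3 : '/' ∈ t := by
        by_contra hx; exact h1 (IH.mpr hx)
      have := pvRfind_neg_le t
      simp [h3]
      omega

theorem pvRfind_getElem (cs : List Char) (h : pvRfindSlash cs ≠ -1) :
    cs[(pvRfindSlash cs).toNat]? = some '/' := by
  induction cs with
  | nil => simp [pvRfindSlash] at h
  | cons c t IH =>
    simp only [pvRfindSlash] at h ⊢
    split_ifs at h ⊢ with h1 h2
    · subst h2; simp
    · simp at h
    · have hr := pvRfind_neg_le t
      have heq : (pvRfindSlash t + 1).toNat = (pvRfindSlash t).toNat + 1 := by omega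
      rw [heq]
      simpa using IH h1

theorem pvRfind_max (cs : List Char) (i : Nat) (h : cs[i]? = some '/') :
    (i : Int) ≤ pvRfindSlash cs := by
  induction cs generalizing i with
  | nil => simp at h
  | cons c t IH =>
    simp only [pvRfindSlash]
    cases i with
    | zero =>
      simp only [List.getElem?_cons_zero, Option.some.injEq] at h
      have := pvRfind_neg_le t
      split_ifs with h1 h2 <;> first | omega | exact absurd h.symm h2
    | succ k =>
      simp only [List.getElem?_cons_succ] at h
      have := IH k h
      split_ifs with h1 h2 <;> push_cast <;> omega

theorem pvRfind_lastsplit (u v : List Char) (h : '/' ∉ v) :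
    pvRfindSlash (u ++ '/' :: v) = u.length := by
  induction u with
  | nil =>
    simp [pvRfindSlash, (pvRfind_eq_neg1 v).mpr h]
  | cons c t IH =>
    have hne : ((t.length : Int)) ≠ -1 := by omega
    simp only [List.cons_append, pvRfindSlash, IH, if_neg hne, List.length_cons]
    push_cast; ring

theorem pvPrefsAux_mem (cs : List Char) : ∀ (d q : List Char),
    q ∈ pvPrefsAux d cs ↔ ∃ i : Nat, cs[i]? = some '/' ∧ q = d ++ cs.take (i + 1) := by
  induction cs with
  | nil => intro d q; simp [pvPrefsAux]
  | cons c t IH =>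
    intro d q
    by_cases hc : c = '/'
    · subst hc
      rw [show pvPrefsAux d ('/' :: t) = (d ++ ['/']) :: pvPrefsAux (d ++ ['/']) t from by
        simp [pvPrefsAux]]
      rw [List.mem_cons, IH]
      constructor
      · rintro (rfl | ⟨i, hi, rfl⟩)
        · exact ⟨0, by simp, by simp⟩
        · exact ⟨i + 1, by simpa using hi, by simp⟩
      · rintro ⟨i, hi, hq⟩
        cases i with
        | zero => left; simpa using hq
        | succ n =>
          right
          exact ⟨n, by simpa using hi, by simpa [List.append_assoc] using hq⟩
    · rw [show pvPrefsAux d (c :: t) = pvPrefsAux (d ++ [c]) t from by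
        simp [pvPrefsAux, hc]]
      rw [IH]
      constructor
      · rintro ⟨i, hi, hq⟩
        exact ⟨i + 1, by simpa using hi, by simpa [List.append_assoc] using hq⟩
      · rintro ⟨i, hi, hq⟩
        cases i with
        | zero =>
          simp only [List.getElem?_cons_zero, Option.some.injEq] at hi
          exact absurd hi hc
        | succ n => exact ⟨n, by simpa using hi, by simpa [List.append_assoc] using hq⟩

theorem pvSP_mem (cs q : List Char) :
    q ∈ pvPrefsAux [] cs ↔ ∃ i : Nat, cs[i]? = some '/' ∧ q = cs.take (i + 1) := by
  rw [pvPrefsAux_mem]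
  simp

theorem pvSP_take_mem (cs : List Char) (m : Nat) (q : List Char) :
    q ∈ pvPrefsAux [] (cs.take m) ↔
      ∃ i : Nat, i < m ∧ cs[i]? = some '/' ∧ q = cs.take (i + 1) := by
  rw [pvSP_mem]
  constructor
  · rintro ⟨i, hi, rfl⟩
    have him : i < m := by
      by_contra hx
      rw [List.getElem?_take] at hi
      simp [Nat.not_lt.mp hx] at hi
      omega
    rw [List.getElem?_take_of_lt him] at hi
    exact ⟨i, him, hi, by rw [List.take_take, min_eq_left (by omega)]⟩
  · rintro ⟨i, him, hi, rfl⟩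
    exact ⟨i, by rw [List.getElem?_take_of_lt him]; exact hi,
      by rw [List.take_take, min_eq_left (by omega)]⟩

theorem pvSP_top (line q : List Char) :
    q ∈ pvPrefsAux [] (line.take (pvRfindSlash line + 1).toNat) ↔ q ∈ pvPrefsAux [] line := by
  rw [pvSP_take_mem, pvSP_mem]
  constructor
  · rintro ⟨i, _, hi, rfl⟩
    exact ⟨i, hi, rfl⟩
  · rintro ⟨i, hi, rfl⟩
    have := pvRfind_max line i hi
    exact ⟨i, by omega, hi, rfl⟩

theorem pvSP_step (p q : List Char) (hne : p ≠ []) (hlast : p[p.length - 1]? = some '/') :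
    q ∈ pvPrefsAux [] p ↔
      (q = p ∨ q ∈ pvPrefsAux [] (p.take (pvRfindSlash p.dropLast + 1).toNat)) := by
  have hlen : 1 ≤ p.length := by
    cases p with
    | nil => exact absurd rfl hne
    | cons a b => simp
  rw [pvSP_mem, pvSP_take_mem]
  constructor
  · rintro ⟨i, hi, rfl⟩
    have hilt : i < p.length := by
      by_contra hx
      simp [List.getElem?_eq_none (Nat.not_lt.mp hx)] at hi
    rcases Nat.lt_or_ge i (p.length - 1) with hc | hc
    · right
      have hdl : p.dropLast[i]? = some '/' := by
        rw [List.dropLast_eq_take, List.getElem?_take_of_lt hc]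
        exact hi
      have := pvRfind_max p.dropLast i hdl
      exact ⟨i, by omega, hi, rfl⟩
    · left
      have : i = p.length - 1 := by omega
      subst this
      rw [show p.length - 1 + 1 = p.length from by omega, List.take_length]
  · rintro (hqp | ⟨i, _, hi, rfl⟩)
    · exact ⟨p.length - 1, hlast, by
        rw [hqp, show p.length - 1 + 1 = p.length from by omega, List.take_length]⟩
    · exact ⟨i, hi, rfl⟩

theorem pvSP_prefix (p q : List Char) (hq : q ∈ pvPrefsAux [] p) : q <+: p := by
  rw [pvSP_mem] at hq
  obtain ⟨i, hi, rfl⟩ := hq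
  exact List.take_prefix _ _

theorem pvPrefix_antisymm (u v : List Char) (h : u <+: v) (h2 : v <+: u) : u = v := by
  obtain ⟨t, rfl⟩ := h
  have hl := h2.length_le
  simp only [List.length_append] at hl
  have ht : t = [] := List.eq_nil_of_length_eq_zero (by omega)
  simp [ht]

theorem pvSP_disq (root p q : List Char) (hq : q ∈ pvPrefsAux [] p)
    (h : p = root ∨ PySem.Chars.startswith p root = false) :
    ¬(q ≠ root ∧ PySem.Chars.startswith q root = true) := by
  rintro ⟨hqr, hsw⟩
  have hpre : q <+: p := pvSP_prefix p q hq
  have hroot : root <+: q := (PySem.Chars.startswith_iff _ _).mp hsw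
  rcases h with hpr | hf
  · subst hpr
    exact hqr (pvPrefix_antisymm q _ hpre hroot)
  · have hsp : PySem.Chars.startswith p root = true :=
      (PySem.Chars.startswith_iff p root).mpr (hroot.trans hpre)
    simp [hf] at hsp

theorem pvPeel_spec (root : List Char) (n : Nat) : ∀ (p : List Char) (dirs : PySem.Set (List Char)),
    p.length = n →
    (p = [] ∨ p[p.length - 1]? = some '/') →
    dirs.Nodup →
    (∀ x ∈ dirs, x.length ≤ p.length → ∀ q ∈ pvPrefsAux [] x, q ≠ root → PySem.Chars.startswith q root = true → q ∈ dirs) →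
    (∀ x ∈ dirs, ∀ q ∈ pvPrefsAux [] x, q ≠ root → PySem.Chars.startswith q root = true → q ∈ dirs ∨ q ∈ pvPrefsAux [] p) →
    (pvPeel root p dirs).Nodup ∧
    (∀ y, y ∈ pvPeel root p dirs ↔ y ∈ dirs ∨ (y ∈ pvPrefsAux [] p ∧ y ≠ root ∧ PySem.Chars.startswith y root = true)) ∧
    (∀ x ∈ pvPeel root p dirs, ∀ q ∈ pvPrefsAux [] x, q ≠ root → PySem.Chars.startswith q root = true → q ∈ pvPeel root p dirs) := by
  induction n using Nat.strong_induction_on with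
  | _ n IH =>
    intro p dirs hlen hp hnd hcl hgl
    rw [pvPeel]
    by_cases hcond : p ≠ [] ∧ p ∉ dirs ∧ p ≠ root ∧ PySem.Chars.startswith p root = true
    · rw [if_pos hcond]
      obtain ⟨hne, hnm, hnr, hsw⟩ := hcond
      have hplen1 : 1 ≤ p.length := List.length_pos_iff.mpr hne
      have hlast : p[p.length - 1]? = some '/' := by
        rcases hp with h | h
        · exact absurd h hne
        · exact h
      have hrle := pvRfind_neg_le p.dropLast
      have hrlt := pvRfind_lt p.dropLast
      rw [List.length_dropLast] at hrlt
      have hm'lt : (pvRfindSlash p.dropLast + 1).toNat < p.length := by omega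
      have hp'len : (p.take (pvRfindSlash p.dropLast + 1).toNat).length < p.length := by
        rw [List.length_take]; omega
      have hp'p : (p.take (pvRfindSlash p.dropLast + 1).toNat) = [] ∨
          (p.take (pvRfindSlash p.dropLast + 1).toNat)[(p.take (pvRfindSlash p.dropLast + 1).toNat).length - 1]? = some '/' := by
        by_cases hr1 : pvRfindSlash p.dropLast = -1
        · left; simp [hr1]
        · right
          have hg := pvRfind_getElem p.dropLast hr1
          have hidx0 : ∀ k : Nat, k < p.length - 1 → p.dropLast[k]? = p[k]? := by
            intro k hk
            rw [List.dropLast_eq_take, List.getElem?_take_of_lt hk]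
          have hidx2 : p.dropLast[(pvRfindSlash p.dropLast).toNat]? = p[(pvRfindSlash p.dropLast).toNat]? :=
            hidx0 _ (by omega)
          have hlp : (p.take (pvRfindSlash p.dropLast + 1).toNat).length = (pvRfindSlash p.dropLast + 1).toNat := by
            rw [List.length_take]; omega
          rw [hlp, show (pvRfindSlash p.dropLast + 1).toNat - 1 = (pvRfindSlash p.dropLast).toNat from by omega,
            List.getElem?_take_of_lt (by omega), ← hidx2]
          exact hg
      have hsplit : ∀ q, q ∈ pvPrefsAux [] p ↔
          (q = p ∨ q ∈ pvPrefsAux [] (p.take (pvRfindSlash p.dropLast + 1).toNat)) :=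
        fun q => pvSP_step p q hne hlast
      have hnd' : (PySem.Set.add dirs p).Nodup := PySem.Set.nodup_add _ _ hnd
      have hcl' : ∀ x ∈ PySem.Set.add dirs p, x.length ≤ (p.take (pvRfindSlash p.dropLast + 1).toNat).length →
          ∀ q ∈ pvPrefsAux [] x, q ≠ root → PySem.Chars.startswith q root = true → q ∈ PySem.Set.add dirs p := by
        intro x hx hxl q hq hq1 hq2
        rcases (PySem.Set.mem_add dirs p x).mp hx with hx' | hxp
        · exact (PySem.Set.mem_add dirs p q).mpr (Or.inl (hcl x hx' (by omega) q hq hq1 hq2))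
        · rw [hxp] at hxl; omega
      have hgl' : ∀ x ∈ PySem.Set.add dirs p, ∀ q ∈ pvPrefsAux [] x, q ≠ root →
          PySem.Chars.startswith q root = true →
          q ∈ PySem.Set.add dirs p ∨ q ∈ pvPrefsAux [] (p.take (pvRfindSlash p.dropLast + 1).toNat) := by
        intro x hx q hq hq1 hq2
        rcases (PySem.Set.mem_add dirs p x).mp hx with hx' | hxp
        · rcases hgl x hx' q hq hq1 hq2 with h | h
          · exact Or.inl ((PySem.Set.mem_add dirs p q).mpr (Or.inl h))
          · rcases (hsplit q).mp h with h2 | h2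
            · exact Or.inl ((PySem.Set.mem_add dirs p q).mpr (Or.inr h2))
            · exact Or.inr h2
        · rw [hxp] at hq
          rcases (hsplit q).mp hq with h2 | h2
          · exact Or.inl ((PySem.Set.mem_add dirs p q).mpr (Or.inr h2))
          · exact Or.inr h2
      obtain ⟨ih1, ih2, ih3⟩ := IH (p.take (pvRfindSlash p.dropLast + 1).toNat).length (by omega)
        (p.take (pvRfindSlash p.dropLast + 1).toNat) (PySem.Set.add dirs p) rfl hp'p hnd' hcl' hgl'
      refine ⟨ih1, ?_, ih3⟩
      intro y
      rw [ih2 y, PySem.Set.mem_add, hsplit y]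
      constructor
      · rintro ((hy | rfl) | ⟨hy, hy1, hy2⟩)
        · exact Or.inl hy
        · exact Or.inr ⟨Or.inl rfl, hnr, hsw⟩
        · exact Or.inr ⟨Or.inr hy, hy1, hy2⟩
      · rintro (hy | ⟨(rfl | hy), hy1, hy2⟩)
        · exact Or.inl (Or.inl hy)
        · exact Or.inl (Or.inr rfl)
        · exact Or.inr ⟨hy, hy1, hy2⟩
    · rw [if_neg hcond]
      have hkey : ∀ y ∈ pvPrefsAux [] p, y ≠ root → PySem.Chars.startswith y root = true → y ∈ dirs := by
        intro y hy hy1 hy2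
        by_cases hne : p = []
        · rw [hne] at hy; simp [pvPrefsAux] at hy
        · by_cases hmem : p ∈ dirs
          · exact hcl p hmem (le_refl _) y hy hy1 hy2
          · have h34 : ¬(p ≠ root ∧ PySem.Chars.startswith p root = true) :=
              fun hx => hcond ⟨hne, hmem, hx.1, hx.2⟩
            have hdisq : p = root ∨ PySem.Chars.startswith p root = false := by
              by_cases hroot : p = root
              · exact Or.inl hroot
              · cases hb : PySem.Chars.startswith p root
                · exact Or.inr rfl
                · exact absurd ⟨hroot, hb⟩ h34
            exact absurd ⟨hy1, hy2⟩ (pvSP_disq root p y hy hdisq)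
      refine ⟨hnd, ?_, ?_⟩
      · intro y
        constructor
        · exact Or.inl
        · rintro (hy | ⟨hy, hy1, hy2⟩)
          · exact hy
          · exact hkey y hy hy1 hy2
      · intro x hx q hq hq1 hq2
        rcases hgl x hx q hq hq1 hq2 with h | h
        · exact h
        · exact hkey q h hq1 hq2

theorem pvPeelLines (root : List Char) (lines : List (List Char)) :
    ∀ (dirs : PySem.Set (List Char)),
    dirs.Nodup →
    (∀ x ∈ dirs, ∀ q ∈ pvPrefsAux [] x, q ≠ root → PySem.Chars.startswith q root = true → q ∈ dirs) →
    (lines.foldl (fun d l => pvPeel root (l.take (pvRfindSlash l + 1).toNat) d) dirs).Nodup ∧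
    (∀ x ∈ lines.foldl (fun d l => pvPeel root (l.take (pvRfindSlash l + 1).toNat) d) dirs,
      ∀ q ∈ pvPrefsAux [] x, q ≠ root → PySem.Chars.startswith q root = true →
        q ∈ lines.foldl (fun d l => pvPeel root (l.take (pvRfindSlash l + 1).toNat) d) dirs) ∧
    (∀ y, y ∈ lines.foldl (fun d l => pvPeel root (l.take (pvRfindSlash l + 1).toNat) d) dirs ↔
      y ∈ dirs ∨ ∃ l ∈ lines, y ∈ pvPrefsAux [] l ∧ y ≠ root ∧ PySem.Chars.startswith y root = true) := by
  induction lines with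
  | nil =>
    intro dirs h1 h2
    exact ⟨h1, h2, by simp⟩
  | cons l t IH =>
    intro dirs h1 h2
    simp only [List.foldl_cons]
    have hrle := pvRfind_neg_le l
    have hrlt := pvRfind_lt l
    have hp0 : (l.take (pvRfindSlash l + 1).toNat) = [] ∨
        (l.take (pvRfindSlash l + 1).toNat)[(l.take (pvRfindSlash l + 1).toNat).length - 1]? = some '/' := by
      by_cases hr1 : pvRfindSlash l = -1
      · left; simp [hr1]
      · right
        have hg := pvRfind_getElem l hr1
        have hlp : (l.take (pvRfindSlash l + 1).toNat).length = (pvRfindSlash l + 1).toNat := by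
          rw [List.length_take]; omega
        rw [hlp, show (pvRfindSlash l + 1).toNat - 1 = (pvRfindSlash l).toNat from by omega,
          List.getElem?_take_of_lt (by omega)]
        exact hg
    obtain ⟨g1, g2, g3⟩ := pvPeel_spec root (l.take (pvRfindSlash l + 1).toNat).length
      (l.take (pvRfindSlash l + 1).toNat) dirs rfl hp0 h1
      (fun x hx _ q hq hq1 hq2 => h2 x hx q hq hq1 hq2)
      (fun x hx q hq hq1 hq2 => Or.inl (h2 x hx q hq hq1 hq2))
    obtain ⟨k1, k2, k3⟩ := IH _ g1 g3
    refine ⟨k1, k2, ?_⟩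
    intro y
    rw [k3 y, g2 y]
    constructor
    · rintro ((hy | ⟨hy, h3, h4⟩) | ⟨l', hl', hmem', hr', hsw'⟩)
      · exact Or.inl hy
      · exact Or.inr ⟨l, by simp, (pvSP_top l y).mp hy, h3, h4⟩
      · exact Or.inr ⟨l', by simp [hl'], hmem', hr', hsw'⟩
    · rintro (hy | ⟨l', hl', hmem', hr', hsw'⟩)
      · exact Or.inl (Or.inl hy)
      · rcases List.mem_cons.mp hl' with rfl | hl''
        · exact Or.inl (Or.inr ⟨(pvSP_top l' y).mpr hmem', hr', hsw'⟩)
        · exact Or.inr ⟨l', hl'', hmem', hr', hsw'⟩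

theorem pvBody_eq (ex : List (String × String × String)) (p : List Char) :
    (let rs := pvRsplit2 p
     if rs.length = 3 then
       ex ++ [(String.ofList (PySem.List.pyGetD rs 0 []),
               String.ofList (PySem.List.pyGetD rs 1 []),
               String.ofList (PySem.List.pyGetD rs 2 []))]
     else ex)
    = (let i := pvRfindSlash p
       if i ≠ -1 then
         let j := pvRfindSlash (p.take i.toNat)
         if j ≠ -1 then
           ex ++ [(String.ofList (p.take j.toNat),
                   String.ofList (PySem.List.slice p (some (j + 1)) (some i)),
                   String.ofList (PySem.List.slice p (some (i + 1)) none))]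
         else ex
       else ex) := by
  by_cases hp : '/' ∈ p
  · obtain ⟨u, v, rfl, hv⟩ := pvDecompose p hp
    have hd1 := (pvRev_split u v hv).1
    have ht1 := (pvRev_split u v hv).2
    by_cases hu : '/' ∈ u
    · obtain ⟨w, x, rfl, hx⟩ := pvDecompose u hu
      have hd2 := (pvRev_split w x hx).1
      have hrs : pvRsplit2 ((w ++ '/' :: x) ++ '/' :: v) = [w, x, v] := by
        have ht2 : (x.reverse ++ '/' :: w.reverse).takeWhile (fun c => !decide (c = '/')) = x.reverse := by
          apply pvTakeWhile_all_slash
          · intro c hc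
            simp only [List.mem_reverse] at hc
            simp; rintro rfl; exact hx hc
          · simp
        simp only [pvRsplit2, hd1, ht1, hd2]
        simp [ht2]
      have hi : pvRfindSlash ((w ++ '/' :: x) ++ '/' :: v) = ((w ++ '/' :: x).length : Int) :=
        pvRfind_lastsplit (w ++ '/' :: x) v hv
      have hine : pvRfindSlash ((w ++ '/' :: x) ++ '/' :: v) ≠ -1 := by rw [hi]; omega
      have hitn : (pvRfindSlash ((w ++ '/' :: x) ++ '/' :: v)).toNat = (w ++ '/' :: x).length := by
        rw [hi]; omega
      have htk : ((w ++ '/' :: x) ++ '/' :: v).take (w ++ '/' :: x).length = w ++ '/' :: x :=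
        List.take_left' rfl
      have hj : pvRfindSlash (w ++ '/' :: x) = (w.length : Int) := pvRfind_lastsplit w x hx
      have hjne : pvRfindSlash (w ++ '/' :: x) ≠ -1 := by rw [hj]; omega
      have htkj : ((w ++ '/' :: x) ++ '/' :: v).take (w.length : Int).toNat = w := by
        rw [show ((w ++ '/' :: x) ++ '/' :: v) = w ++ ('/' :: x ++ '/' :: v) from by simp,
          Int.toNat_natCast]
        exact List.take_left' rfl
      have hsl1 : PySem.List.slice ((w ++ '/' :: x) ++ '/' :: v)
          (some ((w.length : Int) + 1)) (some ((w ++ '/' :: x).length : Int)) = x := by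
        rw [show ((w.length : Int) + 1) = ((w.length + 1 : Nat) : Int) from by push_cast; ring]
        rw [PySem.List.slice_natCast]
        rw [show ((w ++ '/' :: x) ++ '/' :: v) = (w ++ ['/']) ++ (x ++ '/' :: v) from by simp]
        rw [List.drop_left' (by simp)]
        rw [show (w ++ '/' :: x).length - (w.length + 1) = x.length from by simp; try omega]
        exact List.take_left' rfl
      have hsl2 : PySem.List.slice ((w ++ '/' :: x) ++ '/' :: v)
          (some (((w ++ '/' :: x).length : Int) + 1)) none = v := by
        rw [show (((w ++ '/' :: x).length : Int) + 1) = (((w ++ '/' :: x).length + 1 : Nat) : Int) from by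
          push_cast; ring]
        rw [PySem.List.slice_from_natCast]
        rw [show ((w ++ '/' :: x) ++ '/' :: v) = ((w ++ '/' :: x) ++ ['/']) ++ v from by simp]
        exact List.drop_left' (by simp; try omega)
      dsimp only
      rw [hrs, if_pos (show ([w, x, v] : List (List Char)).length = 3 from rfl)]
      rw [if_pos hine, hitn, htk, if_pos hjne, hj, htkj, hi, hsl1, hsl2]
      rfl
    · have hru : pvRfindSlash u = -1 := (pvRfind_eq_neg1 u).mpr hu
      have hdu : u.reverse.dropWhile (fun c => c ≠ '/') = [] := by
        apply List.dropWhile_eq_nil_iff.mpr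
        intro c hc
        simp only [List.mem_reverse] at hc
        simp; rintro rfl; exact hu hc
      have hrs : pvRsplit2 (u ++ '/' :: v) = [u, v] := by
        simp only [pvRsplit2, hd1, ht1, hdu]
        simp
      have hi : pvRfindSlash (u ++ '/' :: v) = (u.length : Int) := pvRfind_lastsplit u v hv
      have hine : pvRfindSlash (u ++ '/' :: v) ≠ -1 := by rw [hi]; omega
      have htk : (u ++ '/' :: v).take (pvRfindSlash (u ++ '/' :: v)).toNat = u := by
        rw [hi, Int.toNat_natCast]
        exact List.take_left' rfl
      dsimp only
      rw [hrs, if_neg (by simp), if_pos hine, htk, if_neg (by simp [hru])]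
  · have hdp : p.reverse.dropWhile (fun c => c ≠ '/') = [] := by
      apply List.dropWhile_eq_nil_iff.mpr
      intro c hc
      simp only [List.mem_reverse] at hc
      simp; rintro rfl; exact hp hc
    have hrs : pvRsplit2 p = [p] := by
      simp only [pvRsplit2, hdp]
    have hi : pvRfindSlash p = -1 := (pvRfind_eq_neg1 p).mpr hp
    dsimp only
    rw [hrs, if_neg (by simp), if_neg (by simp [hi])]

-- ===== VERDICT (by name: the statement is the Claim_ definition above) =====
set_option maxHeartbeats 2000000 in
theorem explode_filepaths_py_spec : Claim_equal_explode_filepaths_py := by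
  intro string root_dir _
  unfold Spec_explode_filepaths_py explode_filepaths_py explode_filepaths_py_alt
  dsimp only
  set lines := PySem.Chars.splitlines (PySem.Chars.strip string.toList) with hlines
  set root := root_dir.toList with hroot
  have hstep : pvStepA root = pvStepB root :=
    funext fun s => funext fun p => pvStepA_eq_stepB root s p
  have hA : ∀ (acc : PySem.Set (List Char)) (line : List Char),
      pvLoopA line root 0 acc = (pvPrefsAux [] line).foldl (pvStepB root) acc := by
    intro acc line
    rw [pvLoopA_eq line.length line root 0 acc (by simp) (by simp)]
    rw [List.take_zero, List.drop_zero, hstep]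
  have hAfun : (fun (acc : PySem.Set (List Char)) (line : List Char) => pvLoopA line root 0 acc)
      = fun acc line => (pvPrefsAux [] line).foldl (pvStepB root) acc :=
    funext fun acc => funext fun line => hA acc line
  rw [hAfun]
  have hempnd : (PySem.Set.empty : PySem.Set (List Char)).Nodup := by
    simp [PySem.Set.empty]
  obtain ⟨bnd, _, bmem⟩ := pvPeelLines root lines PySem.Set.empty hempnd
    (by intro x hx; simp [PySem.Set.empty] at hx)
  have hnodA : (PySem.Set.update (PySem.Set.ofList lines)
      (lines.foldl (fun acc l => (pvPrefsAux [] l).foldl (pvStepB root) acc) PySem.Set.empty)).Nodup :=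
    PySem.Set.nodup_update _ _ (PySem.Set.nodup_ofList lines)
  have hnodB : (PySem.Set.union (PySem.Set.ofList lines)
      (lines.foldl (fun d l => pvPeel root (l.take (pvRfindSlash l + 1).toNat) d) PySem.Set.empty)).Nodup :=
    PySem.Set.nodup_union _ _ (PySem.Set.nodup_ofList lines)
  have hperm : (PySem.Set.update (PySem.Set.ofList lines)
      (lines.foldl (fun acc l => (pvPrefsAux [] l).foldl (pvStepB root) acc) PySem.Set.empty)).Perm
      (PySem.Set.union (PySem.Set.ofList lines)
      (lines.foldl (fun d l => pvPeel root (l.take (pvRfindSlash l + 1).toNat) d) PySem.Set.empty)) := by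
    rw [List.perm_ext_iff_of_nodup hnodA hnodB]
    intro a
    rw [PySem.Set.mem_update, PySem.Set.mem_ofList, pvMem_lines_fold,
      PySem.Set.mem_union, PySem.Set.mem_ofList, bmem a]
  rw [pvSorted_of_perm _ _ hperm]
  apply PySem.List.foldl_congr_mem
  intro acc x _
  exact pvBody_eq acc x
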